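-- pv_equiv track=rewrite | github.com/hardycapel-grh/python6 | access/log_viewer_page.py | highlight_matches
-- ===== SOURCE A (Python) =====
-- def highlight_matches(text: str, query: str) -> str:
--     if not query:
--         return text
--
--     # Case-insensitive highlight
--     lower_text = text.lower()
--     lower_query = query.lower()
--
--     result = ""
--     i = 0
--     qlen = len(lower_query)
--
--     while i < len(text):
--         if lower_text[i:i+qlen] == lower_query:
--             result += f'<span style="background-color: yellow; color: black;">{text[i:i+qlen]}</span>'
--             i += qlen
--         else:
--             result += text[i]
--             i += 1
--
--     return result
-- ===== SOURCE B (Python) =====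
-- def highlight_matches(text: str, query: str) -> str:
--     if not query:
--         return text
--
--     lower_text = text.lower()
--     lower_query = query.lower()
--     qlen = len(query)
--
--     parts = []
--     pos = 0
--     while True:
--         j = lower_text.find(lower_query, pos)
--         if j == -1:
--             parts.append(text[pos:])
--             break
--         parts.append(text[pos:j])
--         parts.append(f'<span style="background-color: yellow; color: black;">{text[j:j+qlen]}</span>')
--         pos = j + qlen
--     return "".join(parts)
-- ===== Notes on version B (the rewrite author's own statement) =====
-- stated objective: faster
-- what changed: Replaced the per-character scan that rebuilds the string with += by a str.find-driven jump loop that copies whole unmatched segments and joins collected parts once at the end.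
import Mathlib
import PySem

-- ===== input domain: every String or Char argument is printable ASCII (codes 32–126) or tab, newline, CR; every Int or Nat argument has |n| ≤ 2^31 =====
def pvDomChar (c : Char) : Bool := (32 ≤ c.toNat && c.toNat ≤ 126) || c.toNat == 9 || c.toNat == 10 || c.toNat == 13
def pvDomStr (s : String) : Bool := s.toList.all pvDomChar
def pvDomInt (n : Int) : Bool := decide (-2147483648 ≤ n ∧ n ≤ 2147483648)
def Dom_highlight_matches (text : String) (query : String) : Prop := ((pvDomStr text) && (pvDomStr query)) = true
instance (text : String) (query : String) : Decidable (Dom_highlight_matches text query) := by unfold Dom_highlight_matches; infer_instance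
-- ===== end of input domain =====

-- B replaces A's per-character scan and += rebuilding with a str.find-driven jump loop that copies whole segments and joins parts once (measured faster).


-- ===== PORT A =====
-- the literal pieces around the highlighted slice
def hmSpanOpen : List Char := "<span style=\"background-color: yellow; color: black;\">".toList
def hmSpanClose : List Char := "</span>".toList

-- A's while loop: i advances by qlen on a match, else by 1; result accumulated by +=
def hmA_loop (t lt lq : List Char) (q : Nat) (hq : 0 < q) (i : Nat) (acc : List Char) : List Char :=
  if h : i < t.length then
    if PySem.List.slice lt (some (i : Int)) (some ((i : Int) + (q : Int))) = lq then
      hmA_loop t lt lq q hq (i + q)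
        (acc ++ hmSpanOpen ++ PySem.List.slice t (some (i : Int)) (some ((i : Int) + (q : Int))) ++ hmSpanClose)
    else
      hmA_loop t lt lq q hq (i + 1) (acc ++ [t[i]])
  else acc
termination_by t.length - i
decreasing_by all_goals omega

def highlight_matches (text : String) (query : String) : String :=
  if hq : query.toList.length = 0 then text
  else
    let lt := PySem.Chars.lower text.toList
    let lq := PySem.Chars.lower query.toList
    String.ofList (hmA_loop text.toList lt lq lq.length
      (by simp only [lq, PySem.Chars.lower, List.length_map]; omega) 0 [])

-- ===== PORT B =====
-- B's loop: find the next match from pos, copy the untouched segment verbatim, wrap the match, jump past it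
def hmB_loop (t lt lq : List Char) (q : Nat) (hq : 0 < q) (hlen : lt.length = t.length)
    (hql : lq.length = q) (pos : Nat) (hpos : pos ≤ t.length) : List Char :=
  let j := PySem.Chars.findFrom lt lq (pos : Int) none
  if hj : j = -1 then
    PySem.List.slice t (some (pos : Int)) none
  else
    have hspec := PySem.Chars.findFrom_natCast_spec lt lq pos (by omega) hj
    have hjt : pos ≤ j.toNat ∧ j.toNat + q ≤ t.length := by
      rcases hspec with ⟨h1, h2, -⟩
      have h3 := h2.length_le
      rw [List.length_drop, hql] at h3
      omega
    PySem.List.slice t (some (pos : Int)) (some j) ++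
      (hmSpanOpen ++ PySem.List.slice t (some j) (some (j + (q : Int))) ++ hmSpanClose) ++
      hmB_loop t lt lq q hq hlen hql (j.toNat + q) (by omega)
termination_by t.length - pos
decreasing_by omega

def highlight_matches_alt (text : String) (query : String) : String :=
  if hq : query.toList.length = 0 then text
  else
    let lt := PySem.Chars.lower text.toList
    let lq := PySem.Chars.lower query.toList
    String.ofList (hmB_loop text.toList lt lq lq.length
      (by simp only [lq, PySem.Chars.lower, List.length_map]; omega)
      (by simp only [lt, PySem.Chars.lower, List.length_map]) rfl 0 (by omega))

-- ===== PRECONDITION & SPEC =====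
def Spec_highlight_matches (text : String) (query : String) (out : String) : Prop := out = highlight_matches_alt text query
instance (text : String) (query : String) (out : String) : Decidable (Spec_highlight_matches text query out) := by unfold Spec_highlight_matches; infer_instance

-- ===== CLAIM (what is proved, stated in full; the proofs are below) =====
def Claim_equal_highlight_matches : Prop := ∀ (text : String) (query : String), Dom_highlight_matches text query → Spec_highlight_matches text query (highlight_matches text query)

-- ===== LEMMAS AND PROOFS =====

-- find w sub is characterised by "prefix here, nowhere earlier"
theorem find_eq_of (w sub : List Char) (k : Nat) (hk : sub <+: w.drop k)
    (hmin : ∀ i < k, ¬ sub <+: w.drop i) : PySem.Chars.find w sub = (k : Int) := by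
  have hinf : sub <:+: w := hk.isInfix.trans (List.drop_suffix k w).isInfix
  have h0 : 0 ≤ PySem.Chars.find w sub := (PySem.Chars.find_nonneg_iff w sub).mpr hinf
  obtain ⟨hp, hm⟩ := PySem.Chars.find_spec h0
  rcases Nat.lt_trichotomy (PySem.Chars.find w sub).toNat k with h | h | h
  · exact absurd hp (hmin _ h)
  · omega
  · exact absurd hk (hm _ h)

-- a match starting at i is found at i
theorem findFrom_at_match (lt lq : List Char) (i : Nat) (hi : i ≤ lt.length)
    (hm : lq <+: lt.drop i) : PySem.Chars.findFrom lt lq (i : Int) none = (i : Int) := by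
  have hfind : PySem.Chars.find (lt.drop i) lq = ((0 : Nat) : Int) :=
    find_eq_of _ _ 0 (by simpa using hm) (by omega)
  rw [PySem.Chars.findFrom_natCast lt lq i hi, hfind]
  simp

-- no match starting at i: searching from i equals searching from i+1
theorem findFrom_step (lt lq : List Char) (i : Nat) (hi : i < lt.length)
    (hnm : ¬ lq <+: lt.drop i) :
    PySem.Chars.findFrom lt lq (i : Int) none = PySem.Chars.findFrom lt lq ((i + 1 : Nat) : Int) none := by
  rw [PySem.Chars.findFrom_natCast lt lq i (le_of_lt hi),
      PySem.Chars.findFrom_natCast lt lq (i + 1) hi]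
  have hdrop : lt.drop i = lt[i] :: lt.drop (i + 1) := List.drop_eq_getElem_cons hi
  by_cases hs : PySem.Chars.find (lt.drop (i + 1)) lq = -1
  · have hii : PySem.Chars.find (lt.drop i) lq = -1 := by
      rw [PySem.Chars.find_eq_neg_one_iff] at hs ⊢
      rw [hdrop, List.infix_cons_iff]
      rw [hdrop] at hnm
      tauto
    simp [hii, hs]
  · have h0 : 0 ≤ PySem.Chars.find (lt.drop (i + 1)) lq := by
      have := PySem.Chars.neg_one_le_find (lt.drop (i + 1)) lq
      omega
    obtain ⟨hp, hmn⟩ := PySem.Chars.find_spec h0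
    have hii : PySem.Chars.find (lt.drop i) lq
        = (((PySem.Chars.find (lt.drop (i + 1)) lq).toNat + 1 : Nat) : Int) := by
      apply find_eq_of
      · rw [hdrop, List.drop_succ_cons]
        exact hp
      · intro j hj
        cases j with
        | zero => simpa using hnm
        | succ j' =>
          rw [hdrop, List.drop_succ_cons]
          exact hmn j' (by omega)
    rw [hii]
    have : ¬ ((((PySem.Chars.find (lt.drop (i + 1)) lq).toNat + 1 : Nat) : Int) = -1) := by omega
    rw [if_neg this, if_neg hs]
    push_cast
    omega

-- B's loop at the end of the text yields nothing
theorem hmB_end (t lt lq : List Char) (q : Nat) (hq : 0 < q) (hlen : lt.length = t.length)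
    (hql : lq.length = q) (hpos : t.length ≤ t.length) :
    hmB_loop t lt lq q hq hlen hql t.length hpos = [] := by
  have hff : PySem.Chars.findFrom lt lq (t.length : Int) none = -1 := by
    rw [PySem.Chars.findFrom_natCast_eq_neg_one_iff lt lq t.length (by omega)]
    have : lt.drop t.length = [] := by
      rw [← hlen]; exact List.drop_length
    rw [this]
    intro hinf
    have : lq = [] := List.eq_nil_of_infix_nil hinf
    have := congrArg List.length this
    simp [hql] at this
    omega
  rw [hmB_loop]
  simp only [hff]
  rw [dif_pos trivial]
  rw [PySem.List.slice_from_natCast]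
  exact List.drop_length

-- B's loop emits the current character verbatim when no match starts at i
theorem hmB_cons (t lt lq : List Char) (q : Nat) (hq : 0 < q) (hlen : lt.length = t.length)
    (hql : lq.length = q) (i : Nat) (h : i < t.length)
    (hnm : ¬ lq <+: lt.drop i) (hp1 : i + 1 ≤ t.length) :
    hmB_loop t lt lq q hq hlen hql i (le_of_lt h) =
      t[i] :: hmB_loop t lt lq q hq hlen hql (i + 1) hp1 := by
  have hstep := findFrom_step lt lq i (by omega) hnm
  rw [hmB_loop]
  conv_rhs => rw [hmB_loop]
  simp only [hstep]
  by_cases hj : PySem.Chars.findFrom lt lq ((i + 1 : Nat) : Int) none = -1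
  · rw [dif_pos hj, dif_pos hj]
    rw [PySem.List.slice_from_natCast, PySem.List.slice_from_natCast]
    exact List.drop_eq_getElem_cons h
  · rw [dif_neg hj, dif_neg hj]
    obtain ⟨h1, h2, -⟩ := PySem.Chars.findFrom_natCast_spec lt lq (i + 1) (by omega) hj
    set f := PySem.Chars.findFrom lt lq ((i + 1 : Nat) : Int) none with hf
    have hfnn : (0 : Int) ≤ f := by omega
    have hfc : f = ((f.toNat : Nat) : Int) := by omega
    have hsl : PySem.List.slice t (some (i : Int)) (some f)
        = t[i] :: PySem.List.slice t (some ((i + 1 : Nat) : Int)) (some f) := by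
      rw [hfc, PySem.List.slice_natCast, PySem.List.slice_natCast]
      rw [List.drop_eq_getElem_cons h]
      have : f.toNat - i = (f.toNat - (i + 1)) + 1 := by omega
      rw [this, List.take_succ_cons]
      rfl
    rw [hsl]
    simp only [List.cons_append, List.append_assoc]
    rfl

theorem main_loop_aux (t lt lq : List Char) (q : Nat) (hq : 0 < q) (hlen : lt.length = t.length)
    (hql : lq.length = q) :
    ∀ (n i : Nat) (hpos : i ≤ t.length), t.length - i ≤ n → ∀ acc : List Char,
      hmA_loop t lt lq q hq i acc = acc ++ hmB_loop t lt lq q hq hlen hql i hpos := by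
  intro n
  induction n with
  | zero =>
    intro i hpos hn acc
    have hi : i = t.length := by omega
    subst hi
    rw [hmA_loop]
    simp only [lt_irrefl, dite_false]
    rw [hmB_end]
    simp
  | succ n ih =>
    intro i hpos hn acc
    by_cases h : i < t.length
    · rw [hmA_loop]
      simp only [dif_pos h]
      by_cases hm : PySem.List.slice lt (some (i : Int)) (some ((i : Int) + (q : Int))) = lq
      · -- match at i
        have hmt := hm
        rw [PySem.List.slice_natCast_add] at hmt
        have hlq : q ≤ lt.length - i := by
          have := congrArg List.length hmt
          simp [hql, List.length_take, List.length_drop] at this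
          omega
        have hiq : i + q ≤ t.length := by omega
        have hpre : lq <+: lt.drop i := by
          rw [List.prefix_iff_eq_take, hql, ← hmt]
        have hff := findFrom_at_match lt lq i (by omega) hpre
        rw [if_pos hm]
        rw [ih (i + q) hiq (by omega)]
        conv_rhs => rw [hmB_loop]
        simp only [hff]
        rw [dif_neg (by omega : ¬ ((i : Int) = -1))]
        simp only [PySem.List.slice_natCast, Int.toNat_natCast, Nat.sub_self, List.take_zero,
          List.nil_append, List.append_assoc]
      · -- no match at i
        have hnm : ¬ lq <+: lt.drop i := by
          intro hpre
          apply hm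
          rw [PySem.List.slice_natCast_add]
          rw [List.prefix_iff_eq_take, hql] at hpre
          exact hpre.symm
        rw [if_neg hm]
        rw [ih (i + 1) (by omega) (by omega)]
        rw [hmB_cons t lt lq q hq hlen hql i h hnm (by omega)]
        simp
        rfl
    · have hi : i = t.length := by omega
      subst hi
      rw [hmA_loop]
      simp only [lt_irrefl, dite_false]
      rw [hmB_end]
      simp

theorem main_loop_eq (t lt lq : List Char) (q : Nat) (hq : 0 < q) (hlen : lt.length = t.length)
    (hql : lq.length = q) (i : Nat) (hpos : i ≤ t.length) (acc : List Char) :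
    hmA_loop t lt lq q hq i acc = acc ++ hmB_loop t lt lq q hq hlen hql i hpos :=
  main_loop_aux t lt lq q hq hlen hql (t.length - i) i hpos (le_refl _) acc

theorem highlight_matches_spec : Claim_equal_highlight_matches := by
  intro text query _
  unfold Spec_highlight_matches highlight_matches highlight_matches_alt
  split
  · rfl
  · rename_i hq
    exact congrArg String.ofList
      ((main_loop_eq _ _ _ _ _ _ rfl 0 (by omega) []).trans (List.nil_append _))
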